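-- pv_equiv track=rewrite | github.com/Djack1010/tami | cati/py/utils/image.py | legend_of_image
-- ===== SOURCE A (Python) =====
-- def legend_of_image(square_side, smali_dim):
--     """These lines read the number of character of the class and calculate where it begins and ends inside the image"""
--     image_legend = ""
--     first = True
--     end = 0
--     for name in smali_dim:
--         if first:
--             end = smali_dim[name] + 1
--             xe = end % square_side + 1
--             ye = end // square_side + 1
--             image_legend = f"{name} starts: 1x and 1y and ends: {xe}x and {ye}y"
--             first = False
--         else:
--             start = end + 1
--             xs = start % square_side + 1
--             ys = start // square_side + 1
--
--             end = start + smali_dim[name]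
--             xe = end % square_side + 1
--             ye = end // square_side + 1
--             image_legend += f"\n{name} starts: {xs}x and {ys}y and ends: {xe}x and {ye}y"
--
--     return image_legend
-- ===== SOURCE B (Python) =====
-- def legend_of_image(square_side, smali_dim):
--     """Closed-form rewrite: every line is computed independently from its
--     index via a per-index sum of the preceding class sizes (no running state)."""
--     names = list(smali_dim)
--     sizes = list(smali_dim.values())
--
--     def coord(v):
--         return f"{v % square_side + 1}x and {v // square_side + 1}y"
--
--     def line(i, name):
--         o = sum(sizes[:i]) + i + 1
--         return (f"{name} starts: {coord(0 if i == 0 else o)}"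
--                 f" and ends: {coord(o + sizes[i])}")
--
--     return "\n".join(line(i, name) for i, name in enumerate(names))
-- ===== Notes on version B (the rewrite author's own statement) =====
-- stated objective: alternative
-- what changed: Replaces A's single stateful loop (a running end offset threaded through string concatenation with a first-iteration flag) with a stateless closed-form computation: each line is produced independently from its index, the end offset being recomputed as the sum of the preceding class sizes plus the index, and the lines are joined at the end; Pre_ excludes duplicate-key assoc lists (no Python dict has them) and square_side = 0 with a nonempty dict (ZeroDivisionError).
import Mathlib
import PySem

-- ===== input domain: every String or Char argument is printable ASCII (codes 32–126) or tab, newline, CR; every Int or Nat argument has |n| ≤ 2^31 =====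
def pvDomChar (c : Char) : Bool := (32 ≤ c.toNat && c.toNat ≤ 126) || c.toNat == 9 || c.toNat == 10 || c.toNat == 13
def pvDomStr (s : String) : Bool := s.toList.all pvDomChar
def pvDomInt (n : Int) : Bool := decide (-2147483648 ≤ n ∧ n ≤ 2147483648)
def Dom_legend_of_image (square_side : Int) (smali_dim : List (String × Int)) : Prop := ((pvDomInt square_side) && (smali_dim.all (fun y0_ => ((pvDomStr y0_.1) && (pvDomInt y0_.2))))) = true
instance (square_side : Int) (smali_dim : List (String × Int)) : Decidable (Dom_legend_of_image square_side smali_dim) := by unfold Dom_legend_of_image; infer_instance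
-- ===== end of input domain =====

-- B replaces A's stateful running-offset loop by a stateless closed form: each line is
-- computed independently from its index via a per-index sum of the preceding class sizes
-- (objective: alternative; B recomputes the prefix sum per line, O(n^2) vs A's O(n)).

-- ===== PORT A =====
-- Python A iterates the dict's keys and looks each key up; the key is always present,
-- so Dict.getD with a dummy default is exact here.
def legend_of_image (square_side : Int) (smali_dim : List (String × Int)) : String :=
  let d : PySem.Dict String Int := PySem.Dict.mk smali_dim
  ((PySem.Dict.keys d).foldl
    (fun (st : String × Bool × Int) (name : String) =>
      if st.2.1 then
        let e := PySem.Dict.getD d name 0 + 1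
        let xe := PySem.Int.mod e square_side + 1
        let ye := PySem.Int.floordiv e square_side + 1
        (name ++ " starts: 1x and 1y and ends: " ++ PySem.Int.toStr xe ++ "x and " ++
          PySem.Int.toStr ye ++ "y", false, e)
      else
        let s := st.2.2 + 1
        let xs := PySem.Int.mod s square_side + 1
        let ys := PySem.Int.floordiv s square_side + 1
        let e := s + PySem.Dict.getD d name 0
        let xe := PySem.Int.mod e square_side + 1
        let ye := PySem.Int.floordiv e square_side + 1
        (st.1 ++ ("\n" ++ name ++ " starts: " ++ PySem.Int.toStr xs ++ "x and " ++
          PySem.Int.toStr ys ++ "y and ends: " ++ PySem.Int.toStr xe ++ "x and " ++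
          PySem.Int.toStr ye ++ "y"), false, e))
    ("", true, 0)).1

-- ===== PORT B =====
-- helper of Source B: coord(v)
def pvCoord (ss v : Int) : String :=
  PySem.Int.toStr (PySem.Int.mod v ss + 1) ++ "x and " ++
    PySem.Int.toStr (PySem.Int.floordiv v ss + 1) ++ "y"

-- helper of Source B: line(i, name); the index i is always in range of sizes,
-- so pyGetD with a dummy default is exact for Python's sizes[i].
def pvLineB (ss : Int) (sizes : List Int) (i : Int) (name : String) : String :=
  let o := (PySem.List.slice sizes none (some i)).sum + i + 1
  name ++ " starts: " ++ pvCoord ss (if i == 0 then 0 else o) ++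
    " and ends: " ++ pvCoord ss (o + PySem.List.pyGetD sizes i 0)

-- Source B: each line is computed independently from its enumerate index; lines joined at the end.
def legend_of_image_alt (square_side : Int) (smali_dim : List (String × Int)) : String :=
  let d : PySem.Dict String Int := PySem.Dict.mk smali_dim
  let names := PySem.Dict.keys d
  let sizes := PySem.Dict.values d
  PySem.Str.join "\n" ((PySem.List.enumerate names 0).map (fun p =>
    pvLineB square_side sizes p.1 p.2))

-- ===== PRECONDITION & SPEC =====
-- Pre_ excludes square_side = 0 with a nonempty dict (Python A raises ZeroDivisionError there) and
-- assoc lists with duplicate keys (a Python dict cannot contain them; on such lists the encoding is ambiguous).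
def Pre_legend_of_image (square_side : Int) (smali_dim : List (String × Int)) : Prop :=
  (smali_dim = [] ∨ square_side ≠ 0) ∧ (smali_dim.map Prod.fst).Nodup
instance (square_side : Int) (smali_dim : List (String × Int)) : Decidable (Pre_legend_of_image square_side smali_dim) := by unfold Pre_legend_of_image; infer_instance

def pvWitness_legend_of_image : Int × (List (String × Int)) := (3, [("a", 2), ("b", 5)])

def Spec_legend_of_image (square_side : Int) (smali_dim : List (String × Int)) (out : String) : Prop := out = legend_of_image_alt square_side smali_dim
instance (square_side : Int) (smali_dim : List (String × Int)) (out : String) : Decidable (Spec_legend_of_image square_side smali_dim out) := by unfold Spec_legend_of_image; infer_instance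

-- ===== CLAIM (what is proved, stated in full; the proofs are below) =====
def Claim_equal_legend_of_image : Prop := ∀ (square_side : Int) (smali_dim : List (String × Int)), Dom_legend_of_image square_side smali_dim → Pre_legend_of_image square_side smali_dim → Spec_legend_of_image square_side smali_dim (legend_of_image square_side smali_dim)

-- ===== LEMMAS AND PROOFS =====

-- the formatted line of one (name, start, end) triple
def pvLine (ss : Int) (q : String × Int × Int) : String :=
  q.1 ++ " starts: " ++ pvCoord ss q.2.1 ++ " and ends: " ++ pvCoord ss q.2.2

-- A's loop body with the dict lookup replaced by the pair's own value
def pvStepA (ss : Int) (st : String × Bool × Int) (p : String × Int) : String × Bool × Int :=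
  if st.2.1 then
    let e := p.2 + 1
    let xe := PySem.Int.mod e ss + 1
    let ye := PySem.Int.floordiv e ss + 1
    (p.1 ++ " starts: 1x and 1y and ends: " ++ PySem.Int.toStr xe ++ "x and " ++
      PySem.Int.toStr ye ++ "y", false, e)
  else
    let s := st.2.2 + 1
    let xs := PySem.Int.mod s ss + 1
    let ys := PySem.Int.floordiv s ss + 1
    let e := s + p.2
    let xe := PySem.Int.mod e ss + 1
    let ye := PySem.Int.floordiv e ss + 1
    (st.1 ++ ("\n" ++ p.1 ++ " starts: " ++ PySem.Int.toStr xs ++ "x and " ++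
      PySem.Int.toStr ys ++ "y and ends: " ++ PySem.Int.toStr xe ++ "x and " ++
      PySem.Int.toStr ye ++ "y"), false, e)

def pvTailA (ss : Int) : Int → List (String × Int) → String
  | _, [] => ""
  | e, (n, v) :: rest => ("\n" ++ pvLine ss (n, e + 1, e + 1 + v)) ++ pvTailA ss (e + 1 + v) rest

def pvEndA (e : Int) (l : List (String × Int)) : Int := l.foldl (fun a p => a + 1 + p.2) e

-- A's (name, start, end) table for the non-first entries, from a running end offset
def pvEntries : Int → List (String × Int) → List (String × Int × Int)
  | _, [] => []
  | e, (n, v) :: rest => (n, e + 1, e + 1 + v) :: pvEntries (e + 1 + v) rest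

lemma pv_mFirst (r : String) :
    " starts: " ++ (PySem.Int.toStr 1 ++ ("x and " ++
      (PySem.Int.toStr 1 ++ ("y and ends: " ++ r))))
      = " starts: 1x and 1y and ends: " ++ r := by
  simp only [← String.append_assoc]
  congr 1

lemma pv_mod_zero (ss : Int) : PySem.Int.mod 0 ss = 0 := by simp [PySem.Int.mod]
lemma pv_fdiv_zero (ss : Int) : PySem.Int.floordiv 0 ss = 0 := by simp [PySem.Int.floordiv]

-- A's fold over the keys equals the fold of pvStepA over the items, given unique keys
lemma pv_A_items (ss : Int) (l : List (String × Int)) (hn : (l.map Prod.fst).Nodup)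
    (init : String × Bool × Int) :
    (PySem.Dict.keys (PySem.Dict.mk l)).foldl
      (fun (st : String × Bool × Int) (name : String) =>
        if st.2.1 then
          let e := PySem.Dict.getD (PySem.Dict.mk l) name 0 + 1
          let xe := PySem.Int.mod e ss + 1
          let ye := PySem.Int.floordiv e ss + 1
          (name ++ " starts: 1x and 1y and ends: " ++ PySem.Int.toStr xe ++ "x and " ++
            PySem.Int.toStr ye ++ "y", false, e)
        else
          let s := st.2.2 + 1
          let xs := PySem.Int.mod s ss + 1
          let ys := PySem.Int.floordiv s ss + 1
          let e := s + PySem.Dict.getD (PySem.Dict.mk l) name 0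
          let xe := PySem.Int.mod e ss + 1
          let ye := PySem.Int.floordiv e ss + 1
          (st.1 ++ ("\n" ++ name ++ " starts: " ++ PySem.Int.toStr xs ++ "x and " ++
            PySem.Int.toStr ys ++ "y and ends: " ++ PySem.Int.toStr xe ++ "x and " ++
            PySem.Int.toStr ye ++ "y"), false, e)) init
    = l.foldl (pvStepA ss) init := by
  have hkeys : PySem.Dict.keys (PySem.Dict.mk l) = l.map Prod.fst := rfl
  rw [hkeys, List.foldl_map]
  apply PySem.List.foldl_congr_mem
  intro acc p hp
  have hget : PySem.Dict.getD (PySem.Dict.mk l) p.1 0 = p.2 := by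
    have h1 : (p.1, p.2) ∈ (PySem.Dict.mk l).items := by simpa using hp
    have h2 : (PySem.Dict.mk l).keys.Nodup := by simpa using hn
    simp [PySem.Dict.getD, PySem.Dict.get?_of_mem_items _ h1 h2]
  simp only [pvStepA, hget]

lemma pv_A_tail (ss : Int) (rest : List (String × Int)) :
    ∀ (acc : String) (e : Int),
      rest.foldl (pvStepA ss) (acc, false, e)
        = (acc ++ pvTailA ss e rest, false, pvEndA e rest) := by
  induction rest with
  | nil => intro acc e; simp [pvTailA, pvEndA]
  | cons p rs ih =>
    intro acc e
    obtain ⟨n, v⟩ := p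
    rw [List.foldl_cons, show pvStepA ss (acc, false, e) (n, v)
        = (acc ++ ("\n" ++ pvLine ss (n, e + 1, e + 1 + v)), false, e + 1 + v) from ?_, ih]
    · simp [pvTailA, pvEndA, String.append_assoc]
    · simp only [pvStepA, pvLine, pvCoord]
      simp [String.append_assoc]

-- sum over take (k+1) splits off the k-th value
lemma pv_take_succ_sum (vals : List Int) (k : ℕ) (v : Int) (rs : List Int)
    (h : vals.drop k = v :: rs) :
    (vals.take (k + 1)).sum = (vals.take k).sum + v := by
  rw [List.take_add, List.sum_append, h]
  simp

-- B's tail lines (index ≥ 1) equal A's table lines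
lemma pv_B_tail (ss : Int) (l : List (String × Int)) :
    ∀ (rest : List (String × Int)) (k : ℕ), 1 ≤ k → l.drop k = rest →
      (PySem.List.enumerate (rest.map Prod.fst) (k : Int)).map (fun p =>
          pvLineB ss (PySem.Dict.values (PySem.Dict.mk l)) p.1 p.2)
        = (pvEntries (((l.map Prod.snd).take k).sum + k) rest).map (pvLine ss) := by
  intro rest
  induction rest with
  | nil => intro k _ _; simp [PySem.List.enumerate_nil, pvEntries]
  | cons p rs ih =>
    intro k hk hdrop
    obtain ⟨n, v⟩ := p
    have hvals : (l.map Prod.snd).drop k = v :: rs.map Prod.snd := by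
      rw [← List.map_drop, hdrop]; rfl
    have hdrop' : l.drop (k + 1) = rs := by
      rw [← List.tail_drop, hdrop]; rfl
    have hsum := pv_take_succ_sum (l.map Prod.snd) k v (rs.map Prod.snd) hvals
    rw [List.map_cons, PySem.List.enumerate_cons, List.map_cons, pvEntries, List.map_cons]
    congr 1
    · -- head line: index k ≥ 1
      have h0 : ((k : Int) == 0) = false := by
        simp only [beq_eq_false_iff_ne, ne_eq]
        omega
      have hO : (PySem.List.slice (PySem.Dict.values (PySem.Dict.mk l)) none (some (k : Int))).sum
          = ((l.map Prod.snd).take k).sum := by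
        rw [PySem.List.slice_to_natCast]
        rfl
      have hG : PySem.List.pyGetD (PySem.Dict.values (PySem.Dict.mk l)) (k : Int) 0 = v := by
        have h := congrArg (fun t => t[0]?) hvals
        simp only [List.getElem?_drop, Nat.add_zero, List.getElem?_cons_zero] at h
        rw [show PySem.Dict.values (PySem.Dict.mk l) = l.map Prod.snd from rfl,
            PySem.List.pyGetD_natCast]
        simp [List.getD, h]
      simp only [pvLineB, h0, Bool.false_eq_true, if_false, hO, hG, pvLine]
    · have hcast : ((k : Int) + 1) = ((k + 1 : ℕ) : Int) := by omega
      rw [hcast, ih (k + 1) (by omega) hdrop']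
      congr 2
      rw [hsum]
      push_cast
      ring


lemma pv_join_line (ss : Int) (rest : List (String × Int)) :
    ∀ (x : String × Int × Int) (e : Int),
      PySem.Str.join "\n" ((x :: pvEntries e rest).map (pvLine ss))
        = pvLine ss x ++ pvTailA ss e rest := by
  induction rest with
  | nil =>
    intro x e
    apply String.toList_inj.mp
    simp [PySem.Str.toList_join, PySem.Chars.join_singleton, pvEntries, pvTailA]
  | cons p rs ih =>
    intro x e
    obtain ⟨n, v⟩ := p
    have hj : PySem.Str.join "\n" ((x :: pvEntries e ((n, v) :: rs)).map (pvLine ss))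
        = pvLine ss x ++ "\n" ++ PySem.Str.join "\n"
            (((n, e + 1, e + 1 + v) :: pvEntries (e + 1 + v) rs).map (pvLine ss)) := by
      apply String.toList_inj.mp
      simp [PySem.Str.toList_join, pvEntries, PySem.Chars.join_cons_cons]
    rw [hj, ih]
    simp [pvTailA, String.append_assoc]

-- ===== VERDICT (by name: the statement is the Claim_ definition above) =====
theorem legend_of_image_spec : Claim_equal_legend_of_image := by
  intro ss l _ hpre
  unfold Spec_legend_of_image legend_of_image legend_of_image_alt
  simp only
  rw [pv_A_items ss l hpre.2]
  cases l with
  | nil => rfl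
  | cons p rest =>
    obtain ⟨n, v⟩ := p
    have hkeys : PySem.Dict.keys (PySem.Dict.mk ((n, v) :: rest)) = n :: rest.map Prod.fst := rfl
    have hhead : pvLineB ss (v :: List.map (fun x => x.2) rest) 0 n
        = pvLine ss (n, 0, v + 1) := by
      simp only [pvLineB, pvLine]
      rw [show ((0 : Int)) = ((0 : ℕ) : Int) from rfl, PySem.List.slice_to_natCast]
      norm_num
      rw [show (1 : Int) + v = v + 1 from by ring]
    have htail := pv_B_tail ss ((n, v) :: rest) rest 1 (le_refl 1) rfl
    norm_num at htail
    rw [List.foldl_cons, show pvStepA ss ("", true, 0) (n, v)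
        = (pvLine ss (n, 0, v + 1), false, v + 1) from ?_, pv_A_tail, hkeys,
        PySem.List.enumerate_cons, List.map_cons]
    · simp only
      norm_num
      rw [htail, hhead, ← List.map_cons, pv_join_line]
    · simp only [pvStepA, pvLine, pvCoord]
      rw [pv_mod_zero, pv_fdiv_zero]
      simp [String.append_assoc, pv_mFirst]
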